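-- pv_equiv track=rewrite | github.com/bauhaus93/file-infection | tests/compare_binary.py | filter_disassembly
-- ===== SOURCE A (Python) =====
-- def filter_disassembly(disassembly):
--     FILTER_WORDS = ["call", "jg", "jnz", "jmp","jnc", "jnl", "nop", "jz", "jna", "ja", "jae", "jb", "jbe", "jc", "jnae"]
--     disassembly = sorted(
--         list(
--             filter(
--                 lambda l: len(l) > 0,
--                 [
--                     list(filter(lambda e: len(e) > 0, line.split(" ")))[2:]
--                     for line in disassembly.split("\n")
--                 ],
--             )
--         )
--     )
--     diss_dict = {}
--     for line in disassembly:
--         line = " ".join(line)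
--         diss_dict[line] = diss_dict.get(line, 0) + 1
--
--     return dict(filter(
--         lambda kv: not (any(map(lambda w: w in kv[0], FILTER_WORDS))), diss_dict.items()))
-- ===== SOURCE B (Python) =====
-- def filter_disassembly(disassembly):
--     FILTER_WORDS = ["call", "jg", "jnz", "jmp", "jnc", "jnl", "nop", "jz", "jna", "ja", "jae", "jb", "jbe", "jc", "jnae"]
--     # Sort ALL parsed lines (empty ones sort to the front), then run-length scan
--     # adjacent equal runs -- no counting dictionary at all.
--     parsed = sorted(
--         tuple(t for t in line.split(" ") if t)[2:]
--         for line in disassembly.split("\n")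
--     )
--
--     def emit(result, key, count):
--         if key:  # skips None and the empty tuple
--             text = " ".join(key)
--             if not any(w in text for w in FILTER_WORDS):
--                 result[text] = count
--
--     result = {}
--     prev, count = None, 0
--     for key in parsed:
--         if key == prev:
--             count += 1
--         else:
--             emit(result, prev, count)
--             prev, count = key, 1
--     emit(result, prev, count)
--     return result
-- ===== Notes on version B (the rewrite author's own statement) =====
-- stated objective: alternative
-- what changed: B keeps no counting dictionary at all: it sorts every parsed line (empty ones included, they sort to the front and are skipped) and then emits (joined key, run length) by a single run-length scan over adjacent equal elements, filtering the blacklist as each run closes.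
import Mathlib
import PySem

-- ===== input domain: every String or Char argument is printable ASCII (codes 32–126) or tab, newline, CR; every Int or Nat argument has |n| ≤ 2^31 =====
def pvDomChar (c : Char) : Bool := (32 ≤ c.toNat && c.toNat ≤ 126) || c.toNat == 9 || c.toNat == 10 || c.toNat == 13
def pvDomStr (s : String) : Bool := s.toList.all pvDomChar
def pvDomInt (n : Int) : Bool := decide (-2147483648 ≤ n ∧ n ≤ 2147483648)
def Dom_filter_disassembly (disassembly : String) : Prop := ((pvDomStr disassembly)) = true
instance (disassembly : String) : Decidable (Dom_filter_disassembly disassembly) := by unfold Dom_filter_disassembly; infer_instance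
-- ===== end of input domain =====

-- B keeps no counting dictionary: it sorts all parsed lines and emits (joined key, run length)
-- by one run-length scan over adjacent equal elements; the return values are proved equal.

-- ===== PORT A =====
-- the FILTER_WORDS constant, shared verbatim by both Pythons
def pvFilterWords : List String := ["call","jg","jnz","jmp","jnc","jnl","nop","jz","jna","ja","jae","jb","jbe","jc","jnae"]

-- list(filter(lambda e: len(e) > 0, line.split(" ")))[2:]  (the identical per-line parse in both Pythons)
def pvParseLine (line : String) : List String :=
  PySem.List.slice (((PySem.Str.split? line " ").getD []).filter (fun e => decide (0 < PySem.Str.len e))) (some 2) none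

-- any(map(lambda w: w in s, FILTER_WORDS))  (identical in both Pythons)
def pvBad (s : String) : Bool := pvFilterWords.any (fun w => PySem.Str.isIn w s)

def filter_disassembly (disassembly : String) : List (String × Int) :=
  let sortedLines := PySem.List.sorted
    ((((PySem.Str.split? disassembly "\n").getD []).map pvParseLine).filter (fun l => decide (0 < l.length)))
    (fun l => l)
  let d := sortedLines.foldl (fun d l =>
      let s := PySem.Str.join " " l
      d.insert s (d.getD s 0 + 1)) PySem.Dict.empty
  d.items.filter (fun kv => !(pvBad kv.1))

-- ===== PORT B =====
-- def emit(result, key, count): …  (the helper inside B; 'if key:' skips None and the empty tuple)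
def pvEmit (result : PySem.Dict String Int) (key : Option (List String)) (count : Int) :
    PySem.Dict String Int :=
  match key with
  | none => result
  | some k =>
    if k.isEmpty then result
    else
      let text := PySem.Str.join " " k
      if pvBad text then result else result.insert text count

-- the body of B's 'for key in parsed' loop, on the state (result, prev, count)
def pvStep (st : PySem.Dict String Int × Option (List String) × Int) (key : List String) :
    PySem.Dict String Int × Option (List String) × Int :=
  if some key == st.2.1 then (st.1, st.2.1, st.2.2 + 1)
  else (pvEmit st.1 st.2.1 st.2.2, some key, 1)

def filter_disassembly_alt (disassembly : String) : List (String × Int) :=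
  let parsed := PySem.List.sorted
    (((PySem.Str.split? disassembly "\n").getD []).map pvParseLine) (fun l => l)
  let st := parsed.foldl pvStep (PySem.Dict.empty, none, 0)
  (pvEmit st.1 st.2.1 st.2.2).items

-- ===== PRECONDITION & SPEC =====
def Spec_filter_disassembly (disassembly : String) (out : List (String × Int)) : Prop := out = filter_disassembly_alt disassembly
instance (disassembly : String) (out : List (String × Int)) : Decidable (Spec_filter_disassembly disassembly out) := by unfold Spec_filter_disassembly; infer_instance

-- ===== CLAIM (what is proved, stated in full; the proofs are below) =====
def Claim_equal_filter_disassembly : Prop := ∀ (disassembly : String), Dom_filter_disassembly disassembly → Spec_filter_disassembly disassembly (filter_disassembly disassembly)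

-- ===== LEMMAS AND PROOFS =====

-- all parsed lines (B sorts these), and the nonempty ones (A sorts those)
def pvAllLines (disassembly : String) : List (List String) :=
  (((PySem.Str.split? disassembly "\n")).getD []).map pvParseLine

def pvLines (disassembly : String) : List (List String) :=
  (pvAllLines disassembly).filter (fun l => decide (0 < l.length))

-- no piece produced by splitting on " " contains ' '
theorem splitOn_go_no_sep (fuel : Nat) : ∀ (l cur : List Char) (acc : List (List Char)),
    (∀ t ∈ acc, ' ' ∉ t) → ' ' ∉ cur → l.length ≤ fuel →
    ∀ t ∈ PySem.Chars.splitOn.go [' '] fuel l cur acc, ' ' ∉ t := by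
  induction fuel with
  | zero =>
    intro l cur acc hacc hcur hlen
    have hl : l = [] := by cases l <;> simp_all
    subst hl
    simp only [PySem.Chars.splitOn.go, List.mem_reverse, List.mem_cons]
    intro t ht
    rcases ht with h | h
    · subst h; simpa using hcur
    · exact hacc t h
  | succ fuel ih =>
    intro l cur acc hacc hcur hlen
    cases l with
    | nil =>
      simp only [PySem.Chars.splitOn.go, List.mem_reverse, List.mem_cons]
      intro t ht
      rcases ht with h | h
      · subst h; simpa using hcur
      · exact hacc t h
    | cons c rest =>
      by_cases hc : c = ' '
      · subst hc
        have heq : PySem.Chars.splitOn.go [' '] (fuel+1) (' '::rest) cur acc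
            = PySem.Chars.splitOn.go [' '] fuel rest [] (cur.reverse :: acc) := by
          simp [PySem.Chars.splitOn.go, List.isPrefixOf]
        rw [heq]
        refine ih _ _ _ ?_ (by simp) (by simpa using Nat.le_of_succ_le_succ (by simpa using hlen))
        intro t ht
        rcases List.mem_cons.mp ht with h | h
        · subst h; simpa using hcur
        · exact hacc t h
      · have heq : PySem.Chars.splitOn.go [' '] (fuel+1) (c::rest) cur acc
            = PySem.Chars.splitOn.go [' '] fuel rest (c :: cur) acc := by
          simp only [PySem.Chars.splitOn.go, List.isPrefixOf]
          have : (' ' == c) = false := by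
            simp only [beq_eq_false_iff_ne, ne_eq]
            exact fun h => hc h.symm
          simp [this]
        rw [heq]
        refine ih _ _ _ hacc ?_ (by simpa using Nat.le_of_succ_le_succ (by simpa using hlen))
        intro h
        rcases List.mem_cons.mp h with h | h
        · exact hc h.symm
        · exact hcur h

theorem splitOn_no_sep (s : List Char) : ∀ t ∈ PySem.Chars.splitOn s [' '], ' ' ∉ t := by
  intro t ht
  exact splitOn_go_no_sep (s.length + 1) s [] [] (by simp) (by simp) (by omega) t ht

-- every token of a parsed line is nonempty and space-free
theorem tok_good (line : String) : ∀ t ∈ pvParseLine line, t.toList ≠ [] ∧ ' ' ∉ t.toList := by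
  intro t ht
  unfold pvParseLine at ht
  have ht' := PySem.List.mem_of_mem_slice _ _ _ ht
  rw [List.mem_filter] at ht'
  obtain ⟨hmem, hlen⟩ := ht'
  have hsplit : (PySem.Str.split? line " ").getD []
      = (PySem.Chars.splitOn line.toList [' ']).map String.ofList := by
    simp [PySem.Str.split?, PySem.Chars.split?]
  rw [hsplit, List.mem_map] at hmem
  obtain ⟨p, hp, rfl⟩ := hmem
  constructor
  · intro h
    simp [PySem.Str.len_eq, h] at hlen
  · rw [String.toList_ofList]
    exact splitOn_no_sep _ p hp

def pvGood (t : List String) : Prop := ∀ s ∈ t, s.toList ≠ [] ∧ ' ' ∉ s.toList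

-- " ".join is injective on nonempty lists of nonempty space-free tokens
theorem join_inj (t1 t2 : List String) (h1 : pvGood t1) (h2 : pvGood t2)
    (hn1 : t1 ≠ []) (hn2 : t2 ≠ []) (h : PySem.Str.join " " t1 = PySem.Str.join " " t2) : t1 = t2 := by
  have h' : (PySem.Str.join " " t1).toList = (PySem.Str.join " " t2).toList := by rw [h]
  rw [PySem.Str.toList_join, PySem.Str.toList_join] at h'
  have hs : (" ":String).toList = [' '] := by decide
  rw [hs] at h'
  unfold PySem.Chars.join at h'
  have e1 : List.splitOn ' ' ([' '].intercalate (t1.map String.toList)) = t1.map String.toList :=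
    List.splitOn_intercalate _ _ (by
      intro l hl
      rw [List.mem_map] at hl
      obtain ⟨s, hs', rfl⟩ := hl
      exact (h1 s hs').2) (by simpa using hn1)
  have e2 : List.splitOn ' ' ([' '].intercalate (t2.map String.toList)) = t2.map String.toList :=
    List.splitOn_intercalate _ _ (by
      intro l hl
      rw [List.mem_map] at hl
      obtain ⟨s, hs', rfl⟩ := hl
      exact (h2 s hs').2) (by simpa using hn2)
  have : t1.map String.toList = t2.map String.toList := by rw [← e1, ← e2, h']
  have hinj : Function.Injective String.toList := fun a b hab => String.toList_injective hab
  exact List.map_injective_iff.mpr hinj this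

theorem mem_pvLines_good (disassembly : String) (t : List String) (h : t ∈ pvLines disassembly) :
    pvGood t ∧ t ≠ [] := by
  unfold pvLines pvAllLines at h
  rw [List.mem_filter] at h
  obtain ⟨hmem, hlen⟩ := h
  rw [List.mem_map] at hmem
  obtain ⟨line, _, rfl⟩ := hmem
  refine ⟨?_, ?_⟩
  · intro s hs
    exact tok_good line s hs
  · intro h
    rw [h] at hlen
    simp at hlen

theorem ofList_sublist {α : Type} [BEq α] (xs : List α) : (PySem.Set.ofList xs).Sublist xs := by
  induction xs using List.reverseRecOn with
  | nil => simp [PySem.Set.ofList]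
  | append_singleton xs x ih =>
    rw [PySem.Set.ofList_append_singleton]
    unfold PySem.Set.add
    split
    · exact ih.trans (List.sublist_append_left _ _)
    · exact List.Sublist.append ih (List.Sublist.refl _)

theorem ofList_map_inj {α β : Type} [BEq α] [LawfulBEq α] [BEq β] [LawfulBEq β]
    (f : α → β) (xs : List α) (hinj : ∀ a ∈ xs, ∀ b ∈ xs, f a = f b → a = b) :
    PySem.Set.ofList (xs.map f) = (PySem.Set.ofList xs).map f := by
  induction xs using List.reverseRecOn with
  | nil => simp [PySem.Set.ofList]
  | append_singleton xs x ih =>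
    have hinj' : ∀ a ∈ xs, ∀ b ∈ xs, f a = f b → a = b := by
      intro a ha b hb; exact hinj a (by simp [ha]) b (by simp [hb])
    rw [List.map_append, List.map_singleton, PySem.Set.ofList_append_singleton,
      PySem.Set.ofList_append_singleton, ih hinj']
    have hmem : PySem.Set.contains (List.map f (PySem.Set.ofList xs)) (f x) = PySem.Set.contains (PySem.Set.ofList xs) x := by
      simp only [PySem.Set.contains_eq_listContains, List.contains_eq_mem, List.mem_map, decide_eq_decide]
      constructor
      · rintro ⟨a, ha, hfa⟩
        have : a = x := hinj a (by simp [(PySem.Set.mem_ofList xs a).mp ha]) x (by simp) hfa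
        exact this ▸ ha
      · intro hx; exact ⟨x, hx, rfl⟩
    unfold PySem.Set.add
    rw [hmem]
    by_cases hx : x ∈ xs <;> simp [hx]

theorem sorted_inst (xs : List (List String)) :
    @PySem.List.sorted (List String) (List String) List.instLT (fun a b => a.decidableLT b) xs (fun l => l) false
    = @PySem.List.sorted (List String) (List String) List.instLT LinearOrder.toDecidableLT xs (fun l => l) false := by
  rw [show (fun (a b : List String) => a.decidableLT b) = (LinearOrder.toDecidableLT (α := List String)) from by funext a b; exact Subsingleton.elim _ _]


-- sorted(set(xs)) has no duplicates (stated in the LinearOrder.toDecidableLT form of the PySem order lemmas)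
theorem sortedSet_nodup (P : List (List String)) :
    (@PySem.List.sorted (List String) (List String) List.instLT LinearOrder.toDecidableLT (PySem.Set.ofList P) (fun l => l) false).Nodup := by
  have hp := PySem.List.sorted_perm (PySem.Set.ofList P) (fun (l : List String) => l) false
  rw [sorted_inst] at hp
  exact (PySem.Set.nodup_ofList P).perm hp.symm

-- count of any element in sorted(xs) (same instance form)
theorem sortedD_count (xs : List (List String)) (x : List String) :
    (@PySem.List.sorted (List String) (List String) List.instLT LinearOrder.toDecidableLT xs (fun l => l) false).count x = xs.count x := by
  have hp := PySem.List.sorted_perm xs (fun (l : List String) => l) false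
  rw [sorted_inst] at hp
  exact hp.count_eq x

-- membership in sorted(xs) (same instance form)
theorem sortedD_mem (xs : List (List String)) (x : List String) :
    x ∈ @PySem.List.sorted (List String) (List String) List.instLT LinearOrder.toDecidableLT xs (fun l => l) false ↔ x ∈ xs := by
  have hp := PySem.List.sorted_perm xs (fun (l : List String) => l) false
  rw [sorted_inst] at hp
  exact hp.mem_iff

-- dedup of the sorted lines = sorted distinct lines
theorem ofList_sorted (P : List (List String)) :
    PySem.Set.ofList (PySem.List.sorted P (fun l => l)) = PySem.List.sorted (PySem.Set.ofList P) (fun l => l) := by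
  rw [sorted_inst P, sorted_inst (PySem.Set.ofList P)]
  refine (PySem.List.sorted_eq_of_perm_of_pairwise_lt (κ := List String) _ _ (fun l => l) ?_ ?_).symm
  · rw [List.perm_ext_iff_of_nodup (PySem.Set.nodup_ofList _) (PySem.Set.nodup_ofList _)]
    intro a
    simp [PySem.Set.mem_ofList, PySem.List.mem_sorted]
  · have hle : List.Pairwise (fun (a b : List String) => a ≤ b)
        (@PySem.List.sorted (List String) (List String) List.instLT LinearOrder.toDecidableLT P (fun l => l) false) :=
      PySem.List.sorted_pairwise P (fun l => l)
    have hle' := hle.sublist (ofList_sublist _)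
    have hne := PySem.Set.nodup_ofList (@PySem.List.sorted (List String) (List String) List.instLT LinearOrder.toDecidableLT P (fun l => l) false)
    exact (hle'.and hne).imp (fun h => lt_of_le_of_ne h.1 h.2)

-- A's value, rephrased through Counter
theorem a_side (disassembly : String) :
    filter_disassembly disassembly =
      ((PySem.Set.ofList ((PySem.List.sorted (pvLines disassembly) (fun l => l)).map (PySem.Str.join " "))).map
        (fun k => (k, ((((PySem.List.sorted (pvLines disassembly) (fun l => l)).map (PySem.Str.join " ")).count k : Nat) : Int)))).filter
        (fun kv => !(pvBad kv.1)) := by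
  unfold filter_disassembly
  dsimp only
  rw [show (fun (d : PySem.Dict String Int) (l : List String) =>
      let s := PySem.Str.join " " l
      d.insert s (d.getD s 0 + 1)) = (fun d l => d.insert (PySem.Str.join " " l) (d.getD (PySem.Str.join " " l) 0 + 1)) from rfl]
  rw [← List.foldl_map (f := PySem.Str.join " ")
    (g := fun (d : PySem.Dict String Int) s => d.insert s (d.getD s 0 + 1))]
  rw [PySem.Dict.foldl_insert_getD_add_one_eq_counter, PySem.Dict.items_counter]
  rfl


-- processing a run of the current key only increments the count
theorem run_same (m : Nat) (k : List String) (r : PySem.Dict String Int) (c : Int) :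
    (List.replicate m k).foldl pvStep (r, some k, c) = (r, some k, c + (m : Int)) := by
  induction m generalizing c with
  | zero => simp
  | succ m ih =>
    rw [List.replicate_succ, List.foldl_cons]
    have hstep : pvStep (r, some k, c) k = (r, some k, c + 1) := by
      simp [pvStep]
    rw [hstep, ih]
    simp only [Prod.mk.injEq, true_and]
    push_cast
    ring

-- processing a full run of a NEW key closes the previous run
theorem run_start (m : Nat) (k : List String) (r : PySem.Dict String Int)
    (prev : Option (List String)) (c : Int) (hprev : prev ≠ some k) (hm : 1 ≤ m) :
    (List.replicate m k).foldl pvStep (r, prev, c) = (pvEmit r prev c, some k, (m : Int)) := by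
  cases m with
  | zero => omega
  | succ m =>
    rw [List.replicate_succ, List.foldl_cons]
    have hbeq : (some k == prev) = false := by
      rw [beq_eq_false_iff_ne]
      exact fun h => hprev h.symm
    have hstep : pvStep (r, prev, c) k = (pvEmit r prev c, some k, 1) := by
      simp [pvStep, hbeq]
    rw [hstep, run_same]
    simp only [Prod.mk.injEq, true_and]
    push_cast
    ring

-- the whole scan over a run decomposition = a fold of emits over the distinct keys
theorem runs_fold (ks : List (List String)) (cnt : List String → Nat) :
    ∀ (r : PySem.Dict String Int) (prev : Option (List String)) (c : Int),
    ks.Nodup → (∀ k ∈ ks, prev ≠ some k) → (∀ k ∈ ks, 1 ≤ cnt k) →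
    pvEmit ((ks.flatMap (fun k => List.replicate (cnt k) k)).foldl pvStep (r, prev, c)).1
      ((ks.flatMap (fun k => List.replicate (cnt k) k)).foldl pvStep (r, prev, c)).2.1
      ((ks.flatMap (fun k => List.replicate (cnt k) k)).foldl pvStep (r, prev, c)).2.2
    = ks.foldl (fun r k => pvEmit r (some k) ((cnt k : Int))) (pvEmit r prev c) := by
  induction ks with
  | nil => intro r prev c _ _ _; simp
  | cons k ks ih =>
    intro r prev c hnd hprev hcnt
    rw [List.nodup_cons] at hnd
    rw [List.flatMap_cons, List.foldl_append]
    rw [run_start (cnt k) k r prev c (hprev k (by simp)) (hcnt k (by simp))]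
    rw [ih (pvEmit r prev c) (some k) ((cnt k : Int)) hnd.2
      (by intro k' hk' h; exact hnd.1 (by rw [Option.some_inj] at h; rw [h]; exact hk'))
      (by intro k' hk'; exact hcnt k' (by simp [hk']))]
    rw [List.foldl_cons]

-- count of an element in a flatMap of runs over distinct keys
theorem count_flatMap_replicate (D : List (List String)) (cnt : List String → Nat)
    (hnd : D.Nodup) (x : List String) :
    (D.flatMap (fun k => List.replicate (cnt k) k)).count x = if x ∈ D then cnt x else 0 := by
  induction D with
  | nil => simp
  | cons k D ih =>
    rw [List.nodup_cons] at hnd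
    rw [List.flatMap_cons, List.count_append, List.count_replicate, ih hnd.2]
    by_cases hx : x = k
    · subst hx
      simp [hnd.1]
    · simp [hx, Ne.symm hx, List.mem_cons]

-- strictly increasing keys keep the flattened runs ordered
theorem flatMap_replicate_pairwise (D : List (List String)) (cnt : List String → Nat)
    (h : List.Pairwise (· < ·) D) :
    List.Pairwise (fun (a b : List String) => a ≤ b) (D.flatMap (fun k => List.replicate (cnt k) k)) := by
  induction D with
  | nil => simp
  | cons k D ih =>
    rw [List.pairwise_cons] at h
    rw [List.flatMap_cons]
    rw [List.pairwise_append]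
    refine ⟨List.pairwise_replicate_of_refl, ih h.2, ?_⟩
    intro x hx y hy
    have hxk : x = k := List.eq_of_mem_replicate hx
    rw [List.mem_flatMap] at hy
    obtain ⟨k', hk', hy'⟩ := hy
    have hyk : y = k' := List.eq_of_mem_replicate hy'
    rw [hxk, hyk]
    exact le_of_lt (h.1 k' hk')

-- B's sorted line list IS the concatenation of the runs of its sorted distinct keys
theorem sorted_eq_flat (P : List (List String)) :
    @PySem.List.sorted (List String) (List String) List.instLT LinearOrder.toDecidableLT P (fun l => l) false
    = (@PySem.List.sorted (List String) (List String) List.instLT LinearOrder.toDecidableLT (PySem.Set.ofList P) (fun l => l) false).flatMap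
        (fun k => List.replicate (P.count k) k) := by
  apply PySem.List.eq_of_perm_of_pairwise_le
  · rw [List.perm_iff_count]
    intro x
    rw [count_flatMap_replicate _ _ (sortedSet_nodup P) x, sortedD_count]
    by_cases hx : x ∈ P
    · have : x ∈ @PySem.List.sorted (List String) (List String) List.instLT LinearOrder.toDecidableLT (PySem.Set.ofList P) (fun l => l) false := by
        rw [sortedD_mem]
        exact (PySem.Set.mem_ofList _ _).mpr hx
      simp [this]
    · have : x ∉ @PySem.List.sorted (List String) (List String) List.instLT LinearOrder.toDecidableLT (PySem.Set.ofList P) (fun l => l) false := by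
        rw [sortedD_mem]
        intro h
        exact hx ((PySem.Set.mem_ofList _ _).mp h)
      simp [this, List.count_eq_zero.mpr hx]
  · exact PySem.List.sorted_pairwise P (fun l => l)
  · exact flatMap_replicate_pairwise _ _ (PySem.List.sorted_ofList_pairwise_lt P)

-- emit on a present key, as nested guarded inserts
theorem pvEmit_some_eq (r : PySem.Dict String Int) (k : List String) (n : Int) :
    pvEmit r (some k) n
      = if !k.isEmpty then
          (if !pvBad (PySem.Str.join " " k) then r.insert (PySem.Str.join " " k) n else r)
        else r := by
  unfold pvEmit
  cases h1 : k.isEmpty <;> cases h2 : pvBad (PySem.Str.join " " k) <;> simp [h1, h2]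

-- dropping the empty key from the sorted distinct parsed lines = sorted distinct nonempty lines
theorem sortedSet_filter_nonempty (disassembly : String) :
    (@PySem.List.sorted (List String) (List String) List.instLT LinearOrder.toDecidableLT (PySem.Set.ofList (pvAllLines disassembly)) (fun l => l) false).filter
      (fun k => !k.isEmpty)
    = @PySem.List.sorted (List String) (List String) List.instLT LinearOrder.toDecidableLT (PySem.Set.ofList (pvLines disassembly)) (fun l => l) false := by
  refine (PySem.List.sorted_eq_of_perm_of_pairwise_lt (κ := List String) _ _ (fun l => l) ?_ ?_).symm
  · rw [List.perm_ext_iff_of_nodup ((sortedSet_nodup _).filter _) (PySem.Set.nodup_ofList _)]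
    intro a
    rw [List.mem_filter, sortedD_mem, PySem.Set.mem_ofList, PySem.Set.mem_ofList]
    unfold pvLines
    rw [List.mem_filter]
    constructor
    · rintro ⟨ha, hne⟩
      exact ⟨ha, by cases a <;> simp_all⟩
    · rintro ⟨ha, hlen⟩
      exact ⟨ha, by cases a <;> simp_all⟩
  · exact ((PySem.List.sorted_ofList_pairwise_lt (pvAllLines disassembly)).sublist List.filter_sublist)

-- the main equation
theorem main_eq (disassembly : String) :
    filter_disassembly disassembly = filter_disassembly_alt disassembly := by
  have hgood := mem_pvLines_good disassembly
  -- the common key list: sorted distinct nonempty parsed lines, blacklist removed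
  set D' := @PySem.List.sorted (List String) (List String) List.instLT LinearOrder.toDecidableLT
      (PySem.Set.ofList (pvLines disassembly)) (fun l => l) false with hD'
  have hmemD' : ∀ k ∈ D', k ∈ pvLines disassembly := by
    intro k hk
    rw [hD', sortedD_mem] at hk
    exact (PySem.Set.mem_ofList _ _).mp hk
  have hndD' : D'.Nodup := sortedSet_nodup _
  set keys := D'.filter (fun k => !pvBad (PySem.Str.join " " k)) with hkeys
  have hmemK : ∀ k ∈ keys, k ∈ pvLines disassembly := by
    intro k hk
    exact hmemD' k (List.filter_sublist.mem hk)
  -- B side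
  have hB : filter_disassembly_alt disassembly
      = keys.map (fun k => (PySem.Str.join " " k, ((pvLines disassembly).count k : Int))) := by
    unfold filter_disassembly_alt
    dsimp only
    rw [show (((PySem.Str.split? disassembly "\n")).getD []).map pvParseLine = pvAllLines disassembly from rfl]
    rw [sorted_inst (pvAllLines disassembly), sorted_eq_flat (pvAllLines disassembly)]
    rw [runs_fold _ _ PySem.Dict.empty none 0 (sortedSet_nodup _) (by intro k _; simp)
      (by
        intro k hk
        rw [sortedD_mem] at hk
        have := (PySem.Set.mem_ofList _ _).mp hk
        exact List.count_pos_iff.mpr this)]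
    rw [show pvEmit PySem.Dict.empty none 0 = PySem.Dict.empty from rfl]
    have h1 : (@PySem.List.sorted (List String) (List String) List.instLT LinearOrder.toDecidableLT (PySem.Set.ofList (pvAllLines disassembly)) (fun l => l) false).foldl
          (fun r k => pvEmit r (some k) (((pvAllLines disassembly).count k : Int))) PySem.Dict.empty
        = (@PySem.List.sorted (List String) (List String) List.instLT LinearOrder.toDecidableLT (PySem.Set.ofList (pvAllLines disassembly)) (fun l => l) false).foldl
          (fun r k =>
            if !k.isEmpty then
              (if !pvBad (PySem.Str.join " " k) then
                r.insert (PySem.Str.join " " k) (((pvAllLines disassembly).count k : Int)) else r)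
            else r) PySem.Dict.empty :=
      PySem.List.foldl_congr_mem _ _ _ _ (by intro acc k _; exact pvEmit_some_eq acc k _)
    rw [h1]
    rw [PySem.List.foldl_if_eq_foldl_filter]
    rw [sortedSet_filter_nonempty disassembly, ← hD']
    rw [PySem.List.foldl_if_eq_foldl_filter]
    rw [← hkeys]
    have h2 : keys.foldl
          (fun r k => r.insert (PySem.Str.join " " k) (((pvAllLines disassembly).count k : Int))) PySem.Dict.empty
        = keys.foldl
          (fun r k => r.insert (PySem.Str.join " " k) (((pvLines disassembly).count k : Int))) PySem.Dict.empty :=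
      PySem.List.foldl_congr_mem _ _ _ _ (by
        intro acc k hk
        have hc : (pvLines disassembly).count k = (pvAllLines disassembly).count k := by
          unfold pvLines
          exact List.count_filter (by
            have := (hgood k (hmemK k hk)).2
            cases k <;> simp_all)
        rw [hc])
    rw [h2]
    have hnodup : (keys.map (PySem.Str.join " ")).Nodup := by
      apply List.Nodup.map_on
      · intro a ha b hb hab
        exact join_inj a b (hgood a (hmemK a ha)).1 (hgood b (hmemK b hb)).1
          (hgood a (hmemK a ha)).2 (hgood b (hmemK b hb)).2 hab
      · exact hndD'.sublist List.filter_sublist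
    rw [PySem.Dict.items_foldl_insert_fresh _ _ _ _ (by intro a _; rfl) hnodup]
    simp [PySem.Dict.empty]
  -- A side
  rw [a_side, hB]
  have hinj : ∀ a ∈ PySem.List.sorted (pvLines disassembly) (fun l => l),
      ∀ b ∈ PySem.List.sorted (pvLines disassembly) (fun l => l),
      PySem.Str.join " " a = PySem.Str.join " " b → a = b := by
    intro a ha b hb hab
    rw [PySem.List.mem_sorted] at ha hb
    exact join_inj a b (hgood a ha).1 (hgood b hb).1 (hgood a ha).2 (hgood b hb).2 hab
  rw [ofList_map_inj (PySem.Str.join " ") _ hinj, ofList_sorted]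
  rw [List.map_map, List.filter_map]
  rw [sorted_inst (PySem.Set.ofList (pvLines disassembly)), ← hD']
  apply List.map_congr_left
  intro t ht
  have htP : t ∈ pvLines disassembly := hmemK t ht
  have hcount : ((PySem.List.sorted (pvLines disassembly) (fun l => l)).map (PySem.Str.join " ")).count
      (PySem.Str.join " " t) = (pvLines disassembly).count t := by
    rw [List.count_eq_countP, List.countP_map]
    rw [List.countP_congr (q := fun l => l == t) (by
      intro l hl
      simp only [Function.comp, beq_iff_eq]
      constructor
      · intro h
        rw [PySem.List.mem_sorted] at hl
        exact join_inj l t (hgood l hl).1 (hgood t htP).1 (hgood l hl).2 (hgood t htP).2 h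
      · intro h; rw [h])]
    rw [← List.count_eq_countP]
    exact (PySem.List.sorted_perm _ _ _).count_eq t
  simp only [Function.comp_apply]
  rw [hcount]

-- ===== VERDICT (by name: the statement is the Claim_ definition above) =====
theorem filter_disassembly_spec : Claim_equal_filter_disassembly := by
  intro dz _
  unfold Spec_filter_disassembly
  exact main_eq dz
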